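-- pv_equiv track=rewrite | github.com/modelscope/AgentEvolver | beyondagent/utils/step_parser.py | _find_first_subseq
-- ===== SOURCE A (Python) =====
-- def _find_first_subseq(hay, needle):
--     """安全的子序列搜索，避免单token误匹配"""
--     if not needle:
--         return None
--     L = len(needle)
--     for i in range(len(hay) - L + 1):
--         if hay[i:i+L] == needle:
--             return i
--     return None
-- ===== SOURCE B (Python) =====
-- def _find_first_subseq(hay, needle):
--     """Rabin-Karp rolling-hash search with exact verification on hash hits."""
--     if not needle:
--         return None
--     L = len(needle)
--     n = len(hay)
--     if L > n:
--         return None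
--     M = (1 << 61) - 1
--     B = 1000003
--     pw = pow(B, L - 1, M)
--     hn = 0
--     for x in needle:
--         hn = (hn * B + x) % M
--     hh = 0
--     for x in hay[:L]:
--         hh = (hh * B + x) % M
--     for i in range(n - L + 1):
--         if hh == hn and hay[i:i+L] == needle:
--             return i
--         if i + L < n:
--             hh = ((hh - hay[i] * pw) * B + hay[i+L]) % M
--     return None
-- ===== Notes on version B (the rewrite author's own statement) =====
-- stated objective: alternative
-- what changed: Replaced the naive scan that re-compares the whole L-element slice at every position with Rabin-Karp: a rolling hash is updated in O(1) per position and the slice is compared only on a hash hit.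
import Mathlib
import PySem

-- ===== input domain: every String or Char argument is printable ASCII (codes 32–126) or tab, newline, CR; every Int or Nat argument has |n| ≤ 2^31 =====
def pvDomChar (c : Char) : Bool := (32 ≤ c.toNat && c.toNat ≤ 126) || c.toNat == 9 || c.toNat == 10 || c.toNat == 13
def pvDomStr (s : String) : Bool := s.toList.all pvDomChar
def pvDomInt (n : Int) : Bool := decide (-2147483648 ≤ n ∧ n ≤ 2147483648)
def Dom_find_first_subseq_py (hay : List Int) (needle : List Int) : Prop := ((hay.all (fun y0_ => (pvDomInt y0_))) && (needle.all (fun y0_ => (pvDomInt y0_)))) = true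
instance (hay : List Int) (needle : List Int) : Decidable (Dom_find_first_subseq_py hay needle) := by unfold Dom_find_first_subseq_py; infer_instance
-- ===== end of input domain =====

-- B replaces A's naive slice-comparison scan by Rabin-Karp rolling-hash search with exact
-- verification on hash hits (alternative algorithm; same return value everywhere).

-- ===== PORT A =====
-- the for-loop with early return, as structural recursion over the range list
def pvALoop (hay needle : List Int) (L : Int) : List Int → Option Int
  | [] => none
  | i :: rest =>
      if PySem.List.slice hay (some i) (some (i + L)) = needle then some i
      else pvALoop hay needle L rest

def find_first_subseq_py (hay : List Int) (needle : List Int) : Option Int :=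
  if needle = [] then none
  else
    let L : Int := needle.length
    pvALoop hay needle L (PySem.List.pyRange 0 ((hay.length : Int) - L + 1) 1)

-- ===== PORT B =====
-- B's main for-loop: carries the rolling hash hh of the current window hay[i:i+L]
def pvBLoop (hay needle : List Int) (L n hn pw M B : Int) : List Int → Int → Option Int
  | [], _ => none
  | i :: rest, hh =>
      if hh = hn ∧ PySem.List.slice hay (some i) (some (i + L)) = needle then some i
      else
        pvBLoop hay needle L n hn pw M B rest
          (if i + L < n then
             PySem.Int.mod ((hh - PySem.List.pyGetD hay i 0 * pw) * B + PySem.List.pyGetD hay (i + L) 0) M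
           else hh)

def find_first_subseq_py_alt (hay : List Int) (needle : List Int) : Option Int :=
  if needle = [] then none
  else
    let L : Int := needle.length
    let n : Int := hay.length
    if L > n then none
    else
      let M : Int := (1 <<< 61) - 1
      let B : Int := 1000003
      let pw : Int := PySem.Int.powMod B (needle.length - 1) M  -- pow(B, L-1, M)
      let hn : Int := needle.foldl (fun h x => PySem.Int.mod (h * B + x) M) 0
      let hh : Int := (PySem.List.slice hay none (some L)).foldl (fun h x => PySem.Int.mod (h * B + x) M) 0
      pvBLoop hay needle L n hn pw M B (PySem.List.pyRange 0 (n - L + 1) 1) hh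

-- ===== PRECONDITION & SPEC =====
def Spec_find_first_subseq_py (hay : List Int) (needle : List Int) (out : Option Int) : Prop := out = find_first_subseq_py_alt hay needle
instance (hay : List Int) (needle : List Int) (out : Option Int) : Decidable (Spec_find_first_subseq_py hay needle out) := by unfold Spec_find_first_subseq_py; infer_instance

-- ===== CLAIM (what is proved, stated in full; the proofs are below) =====
def Claim_equal_find_first_subseq_py : Prop := ∀ (hay : List Int) (needle : List Int), Dom_find_first_subseq_py hay needle → Spec_find_first_subseq_py hay needle (find_first_subseq_py hay needle)

-- ===== LEMMAS AND PROOFS =====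

-- abbreviations used only by the proofs
def pvM : Int := (1 <<< 61) - 1
def pvB : Int := 1000003

-- the reduced hash of a list (what both hash loops of B compute), over Int.emod
def pvH (l : List Int) : Int := l.foldl (fun h x => (h * pvB + x) % pvM) 0

-- the unreduced Horner value
def pvG (l : List Int) (acc : Int) : Int := l.foldl (fun h x => h * pvB + x) acc

lemma pvM_pos : (0:Int) < pvM := by decide

lemma pvH_eq_fold (l : List Int) :
    l.foldl (fun h x => PySem.Int.mod (h * pvB + x) pvM) 0 = pvH l := by
  unfold pvH
  congr 1
  funext h x
  exact PySem.Int.mod_eq_emod_of_pos pvM_pos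

lemma pvG_acc (l : List Int) (acc : Int) :
    pvG l acc = acc * pvB ^ l.length + pvG l 0 := by
  induction l generalizing acc with
  | nil => simp [pvG]
  | cons a t ih =>
      simp only [pvG, List.foldl_cons, List.length_cons]
      rw [show (List.foldl (fun h x => h * pvB + x) (acc * pvB + a) t : Int) = pvG t (acc * pvB + a) from rfl,
          show (List.foldl (fun h x => h * pvB + x) (0 * pvB + a) t : Int) = pvG t (0 * pvB + a) from rfl,
          ih (acc * pvB + a), ih (0 * pvB + a)]
      ring

lemma pvH_modeq_pvG (l : List Int) (acc1 acc2 : Int) (h : acc1 ≡ acc2 [ZMOD pvM]) :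
    l.foldl (fun h x => (h * pvB + x) % pvM) acc1 ≡ pvG l acc2 [ZMOD pvM] := by
  induction l generalizing acc1 acc2 with
  | nil => simpa [pvG] using h
  | cons a t ih =>
      simp only [List.foldl_cons, pvG]
      apply ih
      calc (acc1 * pvB + a) % pvM ≡ acc1 * pvB + a [ZMOD pvM] := Int.emod_emod_of_dvd _ dvd_rfl
        _ ≡ acc2 * pvB + a [ZMOD pvM] := Int.ModEq.add_right a (Int.ModEq.mul_right pvB h)

lemma pvH_modeq (l : List Int) : pvH l ≡ pvG l 0 [ZMOD pvM] :=
  pvH_modeq_pvG l 0 0 (Int.ModEq.refl 0)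

lemma pvH_append_one (l : List Int) (b : Int) :
    pvH (l ++ [b]) = (pvH l * pvB + b) % pvM := by
  simp [pvH, List.foldl_append]

-- the rolling-hash step: moving the window one to the right
lemma pvRoll (a b : Int) (mid : List Int) :
    ((pvH (a :: mid) - a * (pvB ^ mid.length % pvM)) * pvB + b) % pvM = pvH (mid ++ [b]) := by
  rw [pvH_append_one]
  have h1 : pvH (a :: mid) - a * (pvB ^ mid.length % pvM) ≡ pvH mid [ZMOD pvM] := by
    have hA : pvH (a :: mid) ≡ a * pvB ^ mid.length + pvG mid 0 [ZMOD pvM] := by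
      have := pvH_modeq (a :: mid)
      have hG : pvG (a :: mid) 0 = a * pvB ^ mid.length + pvG mid 0 := by
        simp only [pvG, List.foldl_cons, zero_mul, zero_add]
        exact pvG_acc mid a
      rwa [hG] at this
    have hpw : a * (pvB ^ mid.length % pvM) ≡ a * pvB ^ mid.length [ZMOD pvM] :=
      Int.ModEq.mul_left a (Int.emod_emod_of_dvd _ dvd_rfl)
    calc pvH (a :: mid) - a * (pvB ^ mid.length % pvM)
        ≡ (a * pvB ^ mid.length + pvG mid 0) - a * pvB ^ mid.length [ZMOD pvM] :=
          Int.ModEq.sub hA hpw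
      _ = pvG mid 0 := by ring
      _ ≡ pvH mid [ZMOD pvM] := (pvH_modeq mid).symm
  exact Int.ModEq.add_right b (Int.ModEq.mul_right pvB h1)

-- window facts
lemma pvWindow_cons (hay : List Int) (j L0 : Nat) (hL : 1 ≤ L0) (hj : j + L0 ≤ hay.length) :
    (hay.drop j).take L0 = hay[j]'(by omega) :: (hay.drop (j+1)).take (L0 - 1) := by
  obtain ⟨L1, rfl⟩ : ∃ L1, L0 = L1 + 1 := ⟨L0 - 1, by omega⟩
  rw [List.drop_eq_getElem_cons (by omega), List.take_succ_cons]
  simp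

lemma pvWindow_snoc (hay : List Int) (j L0 : Nat) (hL : 1 ≤ L0) (hj : j + 1 + L0 ≤ hay.length) :
    (hay.drop (j+1)).take L0 = (hay.drop (j+1)).take (L0 - 1) ++ [hay[j + L0]'(by omega)] := by
  obtain ⟨L1, rfl⟩ : ∃ L1, L0 = L1 + 1 := ⟨L0 - 1, by omega⟩
  have h : j + 1 + L1 = j + (L1 + 1) := by omega
  rw [List.take_add_one, List.getElem?_drop, h, List.getElem?_eq_getElem (by omega)]
  rfl

lemma pvLen_mid (hay : List Int) (j L0 : Nat) (hL : 1 ≤ L0) (hj : j + 1 + L0 ≤ hay.length) :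
    ((hay.drop (j+1)).take (L0 - 1)).length = L0 - 1 := by
  simp [List.length_take, List.length_drop]
  omega

-- the main loop lemma: from any window position j with a correct rolling hash, the two loops agree
lemma pvLoop_eq (hay needle : List Int) (L0 : Nat) (hL0 : L0 = needle.length) (hL : 1 ≤ L0)
    (k : Nat) :
    ∀ (j : Nat) (hh : Int), j + L0 ≤ hay.length → k = hay.length - L0 - j →
      hh = pvH ((hay.drop j).take L0) →
      pvALoop hay needle (L0 : Int) (PySem.List.pyRange (j : Int) ((hay.length : Int) - L0 + 1) 1)
        = pvBLoop hay needle (L0 : Int) (hay.length : Int) (pvH needle)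
            (pvB ^ (L0 - 1) % pvM) pvM pvB
            (PySem.List.pyRange (j : Int) ((hay.length : Int) - L0 + 1) 1) hh := by
  induction k with
  | zero =>
      intro j hh hj hk hhh
      have hlt : (j : Int) < (hay.length : Int) - L0 + 1 := by omega
      rw [PySem.List.pyRange_one_cons hlt]
      have hnil : PySem.List.pyRange ((j : Int) + 1) ((hay.length : Int) - L0 + 1) 1 = [] :=
        PySem.List.pyRange_one_eq_nil (by omega)
      rw [hnil]
      have hsl : PySem.List.slice hay (some (j : Int)) (some ((j : Int) + (L0 : Int)))
          = (hay.drop j).take L0 := PySem.List.slice_natCast_add hay j L0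
      simp only [pvALoop, pvBLoop, hsl]
      by_cases hmatch : (hay.drop j).take L0 = needle
      · rw [if_pos hmatch, if_pos ⟨by rw [hhh, hmatch], hmatch⟩]
      · rw [if_neg hmatch, if_neg (by intro h; exact hmatch h.2)]
  | succ k ih =>
      intro j hh hj hk hhh
      have hlt : (j : Int) < (hay.length : Int) - L0 + 1 := by omega
      rw [PySem.List.pyRange_one_cons hlt]
      have hsl : PySem.List.slice hay (some (j : Int)) (some ((j : Int) + (L0 : Int)))
          = (hay.drop j).take L0 := PySem.List.slice_natCast_add hay j L0
      simp only [pvALoop, pvBLoop, hsl]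
      by_cases hmatch : (hay.drop j).take L0 = needle
      · rw [if_pos hmatch, if_pos ⟨by rw [hhh, hmatch], hmatch⟩]
      · rw [if_neg hmatch, if_neg (by intro h; exact hmatch h.2)]
        have hcast : ((j : Int) + 1) = ((j + 1 : Nat) : Int) := by push_cast; ring
        rw [hcast]
        apply ih (j + 1) _ (by omega) (by omega)
        -- the rolling-hash update is correct
        have hcond : (j : Int) + (L0 : Int) < (hay.length : Int) := by omega
        rw [if_pos hcond]
        have hc2 : ((j : Int) + (L0 : Int)) = ((j + L0 : Nat) : Int) := by push_cast; ring
        rw [hc2, PySem.List.pyGetD_natCast, PySem.List.pyGetD_natCast,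
            PySem.Int.mod_eq_emod_of_pos pvM_pos]
        have hjlt : j < hay.length := by omega
        have hjL : j + L0 < hay.length := by omega
        rw [List.getD_eq_getElem hay 0 hjlt, List.getD_eq_getElem hay 0 hjL]
        have hwc := pvWindow_cons hay j L0 hL (by omega)
        have hws := pvWindow_snoc hay j L0 hL (by omega)
        have hlm := pvLen_mid hay j L0 hL (by omega)
        rw [hhh, hwc, hws]
        have hroll := pvRoll (hay[j]'hjlt) (hay[j+L0]'hjL) ((hay.drop (j+1)).take (L0-1))
        rw [hlm] at hroll
        exact hroll

-- ===== VERDICT (by name: the statement is the Claim_ definition above) =====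
theorem find_first_subseq_py_spec : Claim_equal_find_first_subseq_py := by
  intro hay needle _
  unfold Spec_find_first_subseq_py find_first_subseq_py find_first_subseq_py_alt
  by_cases hne : needle = []
  · simp [hne]
  · simp only [if_neg hne]
    by_cases hbig : ((needle.length : Int)) > ((hay.length : Int))
    · rw [if_pos hbig]
      have hnil : PySem.List.pyRange 0 ((hay.length : Int) - needle.length + 1) 1 = [] :=
        PySem.List.pyRange_one_eq_nil (by omega)
      rw [hnil]
      rfl
    · rw [if_neg hbig]
      have hL : 1 ≤ needle.length := List.length_pos_of_ne_nil hne
      have hpw : PySem.Int.powMod pvB (needle.length - 1) pvM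
          = pvB ^ (needle.length - 1) % pvM := by
        simp [PySem.Int.powMod, PySem.Int.mod_eq_emod_of_pos pvM_pos]
      have hsl0 : PySem.List.slice hay none (some ((needle.length : Nat) : Int))
          = hay.take needle.length := PySem.List.slice_to_natCast hay needle.length
      simp only [show (((1 <<< 61 : Nat) : Int) - 1) = pvM from rfl,
        show ((1000003 : Int)) = pvB from rfl, hpw, pvH_eq_fold needle, hsl0,
        pvH_eq_fold (hay.take needle.length)]
      have main := pvLoop_eq hay needle needle.length rfl hL (hay.length - needle.length) 0
        (pvH (hay.take needle.length)) (by omega) (by omega) (by simp)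
      simp only [Nat.cast_zero] at main
      exact main
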